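-- pv_equiv track=rewrite | github.com/ChunkyTortoise/EnterpriseHub | ghl_real_estate_ai/services/ai_lead_insights.py | _identify_hidden_objections
-- ===== SOURCE A (Python) =====
-- from typing import Dict, List, Optional
--
-- def _identify_hidden_objections(conversations: List) -> List[str]:
--     """Identify potential objections from conversation patterns"""
--     objections = []
--
--     # Pattern 1: Price concerns
--     price_keywords = [
--         "expensive",
--         "afford",
--         "budget",
--         "too much",
--         "price",
--         "cheaper",
--     ]
--     for conv in conversations:
--         message = conv.get("message", "").lower()
--         if any(kw in message for kw in price_keywords):
--             if "price" not in objections: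
--                 objections.append("pricing")
--             break
--
--     # Pattern 2: Timing concerns
--     timing_keywords = ["not ready", "not sure", "thinking", "maybe", "later"]
--     for conv in conversations:
--         message = conv.get("message", "").lower()
--         if any(kw in message for kw in timing_keywords):
--             if "timing" not in objections:
--                 objections.append("timing")
--             break
--
--     # Pattern 3: Trust/credibility
--     trust_keywords = [
--         "reviews",
--         "references",
--         "credentials",
--         "license",
--         "experience",
--     ]
--     for conv in conversations:
--         message = conv.get("message", "").lower()
--         if any(kw in message for kw in trust_keywords):
--             if "credibility" not in objections:
--                 objections.append("credibility")
--             break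
--
--     return objections[:3]  # Top 3 objections
-- ===== SOURCE B (Python) =====
-- def _identify_hidden_objections(conversations):
--     """Identify potential objections from conversation patterns (single pass, three flags)."""
--     price_keywords = ["expensive", "afford", "budget", "too much", "price", "cheaper"]
--     timing_keywords = ["not ready", "not sure", "thinking", "maybe", "later"]
--     trust_keywords = ["reviews", "references", "credentials", "license", "experience"]
--     price = timing = trust = False
--     for conv in conversations:
--         message = conv.get("message", "").lower()
--         price = price or any(kw in message for kw in price_keywords)
--         timing = timing or any(kw in message for kw in timing_keywords)
--         trust = trust or any(kw in message for kw in trust_keywords)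
--         if price and timing and trust:
--             break
--     return [name for flag, name in
--             ((price, "pricing"), (timing, "timing"), (trust, "credibility")) if flag]
-- ===== Notes on version B (the rewrite author's own statement) =====
-- stated objective: simpler
-- what changed: Replaces A's three separate scans of the conversation list (one per objection category) by a single pass that computes each lowercased message once, maintains three booleans with an all-found break, and assembles the result from the flags in fixed category order.
import Mathlib
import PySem

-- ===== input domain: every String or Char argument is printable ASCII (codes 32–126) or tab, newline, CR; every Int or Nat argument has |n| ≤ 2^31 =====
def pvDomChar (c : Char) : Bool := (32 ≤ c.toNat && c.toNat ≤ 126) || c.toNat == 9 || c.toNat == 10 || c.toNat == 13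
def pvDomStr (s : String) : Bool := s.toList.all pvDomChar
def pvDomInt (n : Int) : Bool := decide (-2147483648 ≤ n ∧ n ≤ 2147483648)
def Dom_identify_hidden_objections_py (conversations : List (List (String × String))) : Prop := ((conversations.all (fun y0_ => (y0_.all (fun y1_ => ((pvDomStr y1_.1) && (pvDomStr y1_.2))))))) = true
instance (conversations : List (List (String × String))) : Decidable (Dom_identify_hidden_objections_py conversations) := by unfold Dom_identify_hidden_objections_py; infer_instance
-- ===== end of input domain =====

-- ===== PORT A =====
-- B changes: one pass with three flags instead of three category scans (each message lowercased once); same output.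
-- A-side helpers (literal pieces of A's code)
def pvAMsg (conv : List (String × String)) : String :=
  PySem.Str.lower (PySem.Dict.getD (PySem.Dict.mk conv) "message" "")

def pvAKwAny (kws : List String) (message : String) : Bool :=
  kws.any (fun kw => PySem.Str.isIn kw message)

-- one 'for conv in conversations: … break' loop of A: true iff the loop appended (first match breaks)
def pvALoop (kws : List String) : List (List (String × String)) → Bool
  | [] => false
  | conv :: rest =>
    if pvAKwAny kws (pvAMsg conv) then true else pvALoop kws rest

def pvAPriceKws : List String := ["expensive", "afford", "budget", "too much", "price", "cheaper"]
def pvATimingKws : List String := ["not ready", "not sure", "thinking", "maybe", "later"]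
def pvATrustKws : List String := ["reviews", "references", "credentials", "license", "experience"]

def identify_hidden_objections_py (conversations : List (List (String × String))) : List String :=
  let objections : List String := []
  let objections :=
    if pvALoop pvAPriceKws conversations then
      (if objections.contains "price" then objections else objections ++ ["pricing"])
    else objections
  let objections :=
    if pvALoop pvATimingKws conversations then
      (if objections.contains "timing" then objections else objections ++ ["timing"])
    else objections
  let objections :=
    if pvALoop pvATrustKws conversations then
      (if objections.contains "credibility" then objections else objections ++ ["credibility"])
    else objections
  PySem.List.slice objections none (some 3)   -- objections[:3]

-- ===== PORT B =====
-- B-side helpers (literal pieces of Source B)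
def pvBMsg (conv : List (String × String)) : String :=
  PySem.Str.lower (PySem.Dict.getD (PySem.Dict.mk conv) "message" "")

def pvBKwAny (kws : List String) (message : String) : Bool :=
  kws.any (fun kw => PySem.Str.isIn kw message)

-- Source B's single loop over conversations with three flags and the all-found break
def pvBLoop (price timing trust : Bool) : List (List (String × String)) → Bool × Bool × Bool
  | [] => (price, timing, trust)
  | conv :: rest =>
    let message := pvBMsg conv
    let price := price || pvBKwAny ["expensive", "afford", "budget", "too much", "price", "cheaper"] message
    let timing := timing || pvBKwAny ["not ready", "not sure", "thinking", "maybe", "later"] message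
    let trust := trust || pvBKwAny ["reviews", "references", "credentials", "license", "experience"] message
    if price && timing && trust then (price, timing, trust) else pvBLoop price timing trust rest

def identify_hidden_objections_py_alt (conversations : List (List (String × String))) : List String :=
  let (price, timing, trust) := pvBLoop false false false conversations
  ([((price, "pricing") : Bool × String), (timing, "timing"), (trust, "credibility")].filter
    (fun p => p.1)).map (fun p => p.2)

-- ===== PRECONDITION & SPEC =====
def Spec_identify_hidden_objections_py (conversations : List (List (String × String))) (out : List String) : Prop := out = identify_hidden_objections_py_alt conversations
instance (conversations : List (List (String × String))) (out : List String) : Decidable (Spec_identify_hidden_objections_py conversations out) := by unfold Spec_identify_hidden_objections_py; infer_instance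

-- ===== CLAIM (what is proved, stated in full; the proofs are below) =====
def Claim_equal_identify_hidden_objections_py : Prop := ∀ (conversations : List (List (String × String))), Dom_identify_hidden_objections_py conversations → Spec_identify_hidden_objections_py conversations (identify_hidden_objections_py conversations)

-- ===== LEMMAS AND PROOFS =====

-- ===== VERDICT (by name: the statement is the Claim_ definition above) =====
-- any-characterisation of A's per-category loop
theorem pvALoop_eq_any (kws : List String) (cs : List (List (String × String))) :
    pvALoop kws cs = cs.any (fun c => pvAKwAny kws (pvAMsg c)) := by
  induction cs with
  | nil => rfl
  | cons c rest ih =>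
    simp only [pvALoop, List.any_cons]
    split_ifs with h <;> simp [h, ih]

-- flag-characterisation of B's single loop with early break
theorem pvBLoop_eq_any (p t r : Bool) (cs : List (List (String × String))) :
    pvBLoop p t r cs =
      (p || cs.any (fun c => pvBKwAny ["expensive", "afford", "budget", "too much", "price", "cheaper"] (pvBMsg c)),
       t || cs.any (fun c => pvBKwAny ["not ready", "not sure", "thinking", "maybe", "later"] (pvBMsg c)),
       r || cs.any (fun c => pvBKwAny ["reviews", "references", "credentials", "license", "experience"] (pvBMsg c))) := by
  induction cs generalizing p t r with
  | nil => simp [pvBLoop]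
  | cons c rest ih =>
    simp only [pvBLoop, List.any_cons]
    split_ifs with h
    · simp only [Bool.and_eq_true] at h
      obtain ⟨⟨hp, ht⟩, hr⟩ := h
      simp only [Bool.or_eq_true] at hp ht hr
      rcases hp with hp | hp <;> rcases ht with ht | ht <;> rcases hr with hr | hr <;>
        simp [hp, ht, hr]
    · rw [ih]
      simp [Bool.or_assoc]

theorem identify_hidden_objections_py_spec : Claim_equal_identify_hidden_objections_py := by
  intro conversations _
  unfold Spec_identify_hidden_objections_py identify_hidden_objections_py identify_hidden_objections_py_alt
  rw [pvBLoop_eq_any]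
  rw [pvALoop_eq_any, pvALoop_eq_any, pvALoop_eq_any]
  have hmsg : pvBMsg = pvAMsg := rfl
  have hkw : pvBKwAny = pvAKwAny := rfl
  rw [hmsg, hkw]
  cases hp : conversations.any (fun c => pvAKwAny pvAPriceKws (pvAMsg c)) <;>
  cases ht : conversations.any (fun c => pvAKwAny pvATimingKws (pvAMsg c)) <;>
  cases hr : conversations.any (fun c => pvAKwAny pvATrustKws (pvAMsg c)) <;>
    simp only [pvAPriceKws, pvATimingKws, pvATrustKws] at hp ht hr <;>
    simp [hp, ht, hr, PySem.List.slice]
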